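-- pv_equiv track=rewrite | github.com/achimkohler/orange-infrared | orangecontrib/spectroscopy/widgets/owpreprocess.py | migrate_preprocessor_list
-- ===== SOURCE A (Python) =====
-- def migrate_preprocessor(preprocessor, version):
--     """ Migrate a preprocessor. A preprocessor should migrate into a list of preprocessors. """
--     name, settings = preprocessor
--     settings = settings.copy()
--     if name == "orangecontrib.infrared.rubberband" and version < 2:
--         name = "orangecontrib.infrared.baseline"
--         settings["baseline_type"] = 1
--         version = 2
--     return [((name, settings), version)]
--
-- def migrate_preprocessor_list(preprocessors):
--     pl = []
--     for p, v in preprocessors: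
--         tl = migrate_preprocessor(p, v)
--         if tl != [(p, v)]:  # if changed, try another migration
--             tl = migrate_preprocessor_list(tl)
--         pl.extend(tl)
--     return pl
-- ===== SOURCE B (Python) =====
-- def migrate_preprocessor(preprocessor, version):
--     """ Migrate a preprocessor. A preprocessor should migrate into a list of preprocessors. """
--     name, settings = preprocessor
--     settings = settings.copy()
--     if name == "orangecontrib.infrared.rubberband" and version < 2:
--         name = "orangecontrib.infrared.baseline"
--         settings["baseline_type"] = 1
--         version = 2
--     return [((name, settings), version)]
--
-- def migrate_preprocessor_list(preprocessors):
--     # Iterative: per input element, an explicit worklist stack replaces the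
--     # self-recursion; each element is fully migrated depth-first before the next.
--     pl = []
--     for p, v in preprocessors:
--         stack = [(p, v)]
--         while stack:
--             q, w = stack.pop()
--             tl = migrate_preprocessor(q, w)
--             if tl == [(q, w)]:
--                 pl.append((q, w))
--             else:
--                 stack.extend(reversed(tl))
--     return pl
-- ===== Notes on version B (the rewrite author's own statement) =====
-- stated objective: alternative
-- what changed: Replaces the self-recursive fixpoint (recurse on the migrated sublist whenever a migration changed something) by an explicit iterative worklist stack that re-pushes changed results until each element stabilises, appending stabilised elements in the same depth-first order.
import Mathlib
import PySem

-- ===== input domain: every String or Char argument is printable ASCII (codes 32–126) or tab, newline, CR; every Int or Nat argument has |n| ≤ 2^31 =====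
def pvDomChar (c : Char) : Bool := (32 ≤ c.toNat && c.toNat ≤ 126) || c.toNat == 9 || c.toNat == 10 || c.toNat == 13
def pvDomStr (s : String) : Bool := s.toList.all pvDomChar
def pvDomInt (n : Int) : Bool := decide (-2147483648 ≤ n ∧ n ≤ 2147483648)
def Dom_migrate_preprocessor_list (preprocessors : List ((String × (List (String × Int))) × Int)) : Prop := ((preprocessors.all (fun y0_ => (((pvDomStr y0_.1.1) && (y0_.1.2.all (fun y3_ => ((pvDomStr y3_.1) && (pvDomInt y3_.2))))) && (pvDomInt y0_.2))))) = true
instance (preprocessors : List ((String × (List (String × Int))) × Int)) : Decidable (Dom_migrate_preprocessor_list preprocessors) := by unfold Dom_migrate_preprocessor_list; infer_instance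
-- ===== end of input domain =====

-- B replaces A's self-recursive fixpoint by an explicit iterative worklist; return values proved equal (objective: alternative).

-- ===== PORT A =====
-- shared helper, kept unchanged in B (as in Source B)
def migrate_preprocessor (preprocessor : String × List (String × Int)) (version : Int) :
    List ((String × (List (String × Int))) × Int) :=
  -- settings.copy() is value-identity here; settings["baseline_type"] = 1 is Dict.insert
  if preprocessor.1 = "orangecontrib.infrared.rubberband" ∧ version < 2 then
    [(("orangecontrib.infrared.baseline",
        (PySem.Dict.insert (PySem.Dict.mk preprocessor.2) "baseline_type" (1 : Int)).items), (2 : Int))]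
  else
    [((preprocessor.1, preprocessor.2), version)]

-- termination measure helpers (used by both ports' decreasing_by)
def pvWt (e : (String × (List (String × Int))) × Int) : Nat :=
  if e.1.1 = "orangecontrib.infrared.rubberband" ∧ e.2 < 2 then 2 else 1

def pvW (l : List ((String × (List (String × Int))) × Int)) : Nat := (l.map pvWt).sum

theorem pvW_append (a b : List ((String × (List (String × Int))) × Int)) :
    pvW (a ++ b) = pvW a + pvW b := by
  simp [pvW]

theorem pv_cond_of_ne (p : String × (List (String × Int))) (v : Int)
    (h : migrate_preprocessor p v ≠ [(p, v)]) :
    p.1 = "orangecontrib.infrared.rubberband" ∧ v < 2 := by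
  unfold migrate_preprocessor at h
  split at h
  · assumption
  · simp at h

theorem pvW_migrate_of_cond (p : String × (List (String × Int))) (v : Int)
    (h : p.1 = "orangecontrib.infrared.rubberband" ∧ v < 2) :
    pvW (migrate_preprocessor p v) = 1 := by
  unfold migrate_preprocessor
  rw [if_pos h]
  simp [pvW, pvWt]

theorem pvWt_of_cond (p : String × (List (String × Int))) (v : Int)
    (h : p.1 = "orangecontrib.infrared.rubberband" ∧ v < 2) : pvWt (p, v) = 2 := by
  simp [pvWt, h]

theorem pvWt_pos (e : (String × (List (String × Int))) × Int) : 1 ≤ pvWt e := by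
  unfold pvWt; split <;> omega

def migrate_preprocessor_list (preprocessors : List ((String × (List (String × Int))) × Int)) :
    List ((String × (List (String × Int))) × Int) :=
  match preprocessors with
  | [] => []
  | (p, v) :: rest =>
    let tl := migrate_preprocessor p v
    (if _h : tl ≠ [(p, v)] then migrate_preprocessor_list tl else tl) ++
      migrate_preprocessor_list rest
termination_by pvW preprocessors
decreasing_by
  · obtain ⟨h1, h2⟩ := pv_cond_of_ne p v _h
    have := pvW_migrate_of_cond p v ⟨h1, h2⟩
    have := pvWt_of_cond p v ⟨h1, h2⟩
    simp only [pvW, List.map_cons, List.sum_cons] at *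
    omega
  · have := pvWt_pos (p, v)
    simp only [pvW, List.map_cons, List.sum_cons]
    omega

-- ===== PORT B =====
-- the inner 'while stack:' loop of Source B; head of the list is the top of the Python stack
def migrate_worklist (pl stack : List ((String × (List (String × Int))) × Int)) :
    List ((String × (List (String × Int))) × Int) :=
  match stack with
  | [] => pl
  | (q, w) :: rest =>
    let tl := migrate_preprocessor q w
    if _h : tl = [(q, w)] then migrate_worklist (pl ++ [(q, w)]) rest
    else migrate_worklist pl (tl ++ rest)
termination_by pvW stack
decreasing_by
  · have := pvWt_pos (q, w)
    simp only [pvW, List.map_cons, List.sum_cons]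
    omega
  · obtain ⟨h1, h2⟩ := pv_cond_of_ne q w _h
    have := pvW_migrate_of_cond q w ⟨h1, h2⟩
    have := pvWt_of_cond q w ⟨h1, h2⟩
    rw [pvW_append]
    simp only [pvW, List.map_cons, List.sum_cons] at *
    omega

def migrate_preprocessor_list_alt (preprocessors : List ((String × (List (String × Int))) × Int)) :
    List ((String × (List (String × Int))) × Int) :=
  preprocessors.foldl (fun pl e => migrate_worklist pl [e]) []

-- ===== PRECONDITION & SPEC =====
def Spec_migrate_preprocessor_list (preprocessors : List ((String × (List (String × Int))) × Int)) (out : List ((String × (List (String × Int))) × Int)) : Prop := out = migrate_preprocessor_list_alt preprocessors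
instance (preprocessors : List ((String × (List (String × Int))) × Int)) (out : List ((String × (List (String × Int))) × Int)) : Decidable (Spec_migrate_preprocessor_list preprocessors out) := by unfold Spec_migrate_preprocessor_list; infer_instance

-- ===== CLAIM (what is proved, stated in full; the proofs are below) =====
def Claim_equal_migrate_preprocessor_list : Prop := ∀ (preprocessors : List ((String × (List (String × Int))) × Int)), Dom_migrate_preprocessor_list preprocessors → Spec_migrate_preprocessor_list preprocessors (migrate_preprocessor_list preprocessors)

-- ===== LEMMAS AND PROOFS =====

theorem migl_nil : migrate_preprocessor_list [] = [] := by
  rw [migrate_preprocessor_list]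

theorem migl_cons (p : String × (List (String × Int))) (v : Int)
    (rest : List ((String × (List (String × Int))) × Int)) :
    migrate_preprocessor_list ((p, v) :: rest) =
      (if migrate_preprocessor p v ≠ [(p, v)]
        then migrate_preprocessor_list (migrate_preprocessor p v)
        else migrate_preprocessor p v) ++ migrate_preprocessor_list rest := by
  rw [migrate_preprocessor_list]
  split <;> simp_all

theorem migl_append (a b : List ((String × (List (String × Int))) × Int)) :
    migrate_preprocessor_list (a ++ b) =
      migrate_preprocessor_list a ++ migrate_preprocessor_list b := by
  induction a with
  | nil => simp [migl_nil]
  | cons e t ih =>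
    obtain ⟨p, v⟩ := e
    rw [List.cons_append, migl_cons, migl_cons, ih, List.append_assoc]

theorem worklist_eq (pl stack : List ((String × (List (String × Int))) × Int)) :
    migrate_worklist pl stack = pl ++ migrate_preprocessor_list stack := by
  induction pl, stack using migrate_worklist.induct with
  | case1 pl => rw [migrate_worklist, migl_nil, List.append_nil]
  | case2 pl q w rest tl htl ih =>
    rw [migrate_worklist, dif_pos htl, ih, migl_cons, if_neg (not_not_intro htl),
      show migrate_preprocessor q w = [(q, w)] from htl, List.append_assoc]
  | case3 pl q w rest tl htl ih =>
    rw [migrate_worklist, dif_neg htl, ih, migl_append, migl_cons, if_pos htl]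

theorem foldl_worklist (ps acc : List ((String × (List (String × Int))) × Int)) :
    ps.foldl (fun pl e => migrate_worklist pl [e]) acc = acc ++ migrate_preprocessor_list ps := by
  induction ps generalizing acc with
  | nil => simp [migl_nil]
  | cons e t ih =>
    obtain ⟨p, v⟩ := e
    rw [List.foldl_cons, ih, worklist_eq,
      migl_cons p v [], migl_nil, List.append_nil, migl_cons p v t, List.append_assoc]

-- ===== VERDICT (by name: the statement is the Claim_ definition above) =====
theorem migrate_preprocessor_list_spec : Claim_equal_migrate_preprocessor_list := by
  intro ps _
  unfold Spec_migrate_preprocessor_list migrate_preprocessor_list_alt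
  rw [foldl_worklist, List.nil_append]
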